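-- pv_equiv track=rewrite | github.com/25021891-trannhatminh/COM1050_11_25021891_Tran-Nhat-Minh | buoi_10.py | swap_to_min
-- ===== SOURCE A (Python) =====
-- def swap_to_min(a,idx = 0):
--     a = list(a)
--     if idx >= len(a) - 1:
--         return ''.join(a)
--     target_idx = -1
--     min_val = a[idx]
--     for j in range(len(a) - 1,idx,-1):
--         if a[j] == '0' and idx == 0:
--             return swap_to_min(a,idx + 1)
--         if a[j] < min_val:
--             target_idx = j
--             min_val = a[j]
--     if target_idx != -1:
--         a[idx],a[target_idx] = a[target_idx],a[idx]
--         return "".join(a)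
--     return swap_to_min(a,idx + 1)
-- ===== SOURCE B (Python) =====
-- def swap_to_min(a, idx=0):
--     s = list(a)
--     n = len(s)
--     if idx >= n - 1:
--         return ''.join(s)
--     start = 1 if idx == 0 and '0' in s[1:] else idx
--     best = -1
--     tgt = -1
--     mv = s[n - 1]
--     mj = n - 1
--     for i in range(n - 2, start - 1, -1):
--         if mv < s[i]:
--             best = i
--             tgt = mj
--         if s[i] < mv:
--             mv = s[i]
--             mj = i
--     if best == -1:
--         return ''.join(s)
--     s[best], s[tgt] = s[tgt], s[best]
--     return ''.join(s)
-- ===== Notes on version B (the rewrite author's own statement) =====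
-- stated objective: faster
-- what changed: Replaces A's index-by-index recursion, whose every level rescans the whole remaining suffix, with a single backward pass that maintains the running suffix minimum and its rightmost index and records the leftmost position admitting a beneficial swap.
-- outside the precondition, e.g. on swap_to_min('10', -1): A returns '10', B returns '01'
import Mathlib
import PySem

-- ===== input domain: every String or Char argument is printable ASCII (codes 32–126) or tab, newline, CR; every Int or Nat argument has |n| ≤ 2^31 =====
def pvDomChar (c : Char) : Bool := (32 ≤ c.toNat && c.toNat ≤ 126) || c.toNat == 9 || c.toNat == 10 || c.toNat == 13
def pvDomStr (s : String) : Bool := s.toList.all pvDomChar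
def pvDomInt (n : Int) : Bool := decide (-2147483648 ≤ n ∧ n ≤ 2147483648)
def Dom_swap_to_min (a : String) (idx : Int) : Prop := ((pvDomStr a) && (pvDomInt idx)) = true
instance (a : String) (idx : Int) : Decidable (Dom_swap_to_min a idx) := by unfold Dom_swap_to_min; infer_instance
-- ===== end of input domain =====

-- B replaces A's per-position recursion (each level rescanning the suffix) by ONE backward pass
-- keeping the running suffix minimum; equivalence is proved for all idx ≥ 0 (Pre_).


-- ===== PORT A =====
-- A's inner loop 'for j in range(len(a)-1, idx, -1)': none = the "a[j]=='0' and idx==0" early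
-- return (then A recurses), some t = loop finished with target_idx = t.
def pvScanA (s : List Char) (idx : Int) : List Int → Int → Char → Option Int
  | [], target, _ => some target
  | j :: js, target, minVal =>
    let c := PySem.List.pyGetD s j ' '
    if c == '0' && idx == 0 then none
    else if c < minVal then pvScanA s idx js j c
    else pvScanA s idx js target minVal

-- pyGetD/pySetD are exact for the indices reachable under Pre_ (all nonnegative and in range).
def pvSwapToMinA (s : List Char) (idx : Int) : List Char :=
  if idx ≥ (s.length : Int) - 1 then s
  else
    match pvScanA s idx (PySem.List.pyRange ((s.length : Int) - 1) idx (-1)) (-1)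
        (PySem.List.pyGetD s idx ' ') with
    | none => pvSwapToMinA s (idx + 1)
    | some t =>
      if t ≠ -1 then
        let ci := PySem.List.pyGetD s idx ' '
        let ct := PySem.List.pyGetD s t ' '
        PySem.List.pySetD (PySem.List.pySetD s idx ct) t ci
      else pvSwapToMinA s (idx + 1)
termination_by ((s.length : Int) + 1 - idx).toNat
decreasing_by all_goals omega

def swap_to_min (a : String) (idx : Int) : String := String.ofList (pvSwapToMinA a.toList idx)

-- ===== PORT B =====
-- one iteration of B's backward loop; state = (best, tgt, mv, mj)
def pvStepB (s : List Char) (st : Int × Int × Char × Int) (i : Int) : Int × Int × Char × Int :=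
  let c := PySem.List.pyGetD s i ' '
  let bt := if st.2.2.1 < c then (i, st.2.2.2) else (st.1, st.2.1)
  let mm := if c < st.2.2.1 then (c, i) else st.2.2
  (bt.1, bt.2, mm.1, mm.2)

def pvAltList (s : List Char) (idx : Int) : List Char :=
  let n : Int := s.length
  if idx ≥ n - 1 then s
  else
    let start : Int := if idx == 0 && (PySem.List.slice s (some 1) none).contains '0' then 1 else idx
    let r := (PySem.List.pyRange (n - 2) (start - 1) (-1)).foldl (pvStepB s)
               (-1, -1, PySem.List.pyGetD s (n - 1) ' ', n - 1)
    if r.1 == -1 then s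
    else
      let ci := PySem.List.pyGetD s r.1 ' '
      let ct := PySem.List.pyGetD s r.2.1 ' '
      PySem.List.pySetD (PySem.List.pySetD s r.1 ct) r.2.1 ci

def swap_to_min_alt (a : String) (idx : Int) : String := String.ofList (pvAltList a.toList idx)

-- ===== PRECONDITION & SPEC =====
-- Pre_ excludes negative idx: idx is the recursion's start-position parameter (default 0), a
-- negative value is outside the function's natural domain and A's value there is an artefact of
-- Python negative-index wraparound.
def Pre_swap_to_min (a : String) (idx : Int) : Prop := 0 ≤ idx
instance (a : String) (idx : Int) : Decidable (Pre_swap_to_min a idx) := by unfold Pre_swap_to_min; infer_instance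
def pvWitness_swap_to_min : String × Int := ("102", 0)

def Spec_swap_to_min (a : String) (idx : Int) (out : String) : Prop := out = swap_to_min_alt a idx
instance (a : String) (idx : Int) (out : String) : Decidable (Spec_swap_to_min a idx out) := by unfold Spec_swap_to_min; infer_instance

-- ===== CLAIM (what is proved, stated in full; the proofs are below) =====
def Claim_equal_swap_to_min : Prop := ∀ (a : String) (idx : Int), Dom_swap_to_min a idx → Pre_swap_to_min a idx → Spec_swap_to_min a idx (swap_to_min a idx)

-- ===== LEMMAS AND PROOFS =====

-- proof-side view of the two loops --------------------------------------------------------------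

-- A's loop when the '0' rule never fires, as a plain fold; state = (target_idx, min_val)
def pvStepA (s : List Char) (st : Int × Char) (j : Int) : Int × Char :=
  if PySem.List.pyGetD s j ' ' < st.2 then (j, PySem.List.pyGetD s j ' ') else st

-- the (mv, mj) part of B's loop as its own fold
def pvStepM (s : List Char) (st : Char × Int) (j : Int) : Char × Int :=
  if PySem.List.pyGetD s j ' ' < st.1 then (PySem.List.pyGetD s j ' ', j) else st

-- (mv, mj) of B's loop run down to position b (suffix minimum of positions b..n-1, rightmost)
def pvMM (s : List Char) (b : Int) : Char × Int :=
  (PySem.List.pyRange ((s.length : Int) - 2) (b - 1) (-1)).foldl (pvStepM s)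
    (PySem.List.pyGetD s ((s.length : Int) - 1) ' ', (s.length : Int) - 1)

-- countdown range, peeled at the BOTTOM
theorem pvRange_neg_one_snoc (a b : Int) (h : b < a) :
    PySem.List.pyRange a b (-1) = PySem.List.pyRange a (b + 1) (-1) ++ [b + 1] := by
  rw [PySem.List.pyRange_neg_one_eq_reverse, PySem.List.pyRange_neg_one_eq_reverse,
    PySem.List.pyRange_one_cons (by omega)]
  simp

-- A's scan is the plain fold when no iteration hits the '0'-and-idx=0 early return
theorem pvScanA_eq_fold (s : List Char) (idx : Int) (js : List Int)
    (h : ∀ j ∈ js, (PySem.List.pyGetD s j ' ' == '0' && idx == 0) = false) :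
    ∀ t m, pvScanA s idx js t m = some ((js.foldl (pvStepA s) (t, m)).1) := by
  induction js with
  | nil => intro t m; simp [pvScanA]
  | cons j js ih =>
    intro t m
    have hj := h j (by simp)
    have hrest : ∀ x ∈ js, (PySem.List.pyGetD s x ' ' == '0' && idx == 0) = false := by
      intro x hx; exact h x (by simp [hx])
    simp only [pvScanA, hj, Bool.false_eq_true, if_false, List.foldl_cons, pvStepA]
    by_cases hcm : PySem.List.pyGetD s j ' ' < m <;> simp [hcm, ih hrest]

-- A's scan at idx = 0 early-returns as soon as any scanned position holds '0'
theorem pvScanA_zero (s : List Char) (js : List Int)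
    (h : ∃ j ∈ js, PySem.List.pyGetD s j ' ' = '0') :
    ∀ t m, pvScanA s 0 js t m = none := by
  induction js with
  | nil => simp at h
  | cons j js ih =>
    intro t m
    by_cases hj : PySem.List.pyGetD s j ' ' = '0'
    · simp [pvScanA, hj]
    · have : ∃ x ∈ js, PySem.List.pyGetD s x ' ' = '0' := by
        rcases h with ⟨x, hx, hx0⟩
        rcases List.mem_cons.mp hx with hx' | hx'
        · exact absurd (hx' ▸ hx0) hj
        · exact ⟨x, hx', hx0⟩
      simp only [pvScanA]
      have hj' : (PySem.List.pyGetD s j ' ' == '0') = false := by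
        simpa using hj
      simp [hj', ih this]

-- the (mv, mj) components of B's fold do not depend on (best, tgt)
theorem pvFoldB_proj (s : List Char) (js : List Int) :
    ∀ b0 t0 m0 j0, ((js.foldl (pvStepB s) (b0, t0, m0, j0)).2.2 : Char × Int)
      = js.foldl (pvStepM s) (m0, j0) := by
  induction js with
  | nil => intro b0 t0 m0 j0; rfl
  | cons j js ih =>
    intro b0 t0 m0 j0
    simp only [List.foldl_cons, pvStepB, pvStepM]
    split <;> split <;> simp_all

-- the rightmost-argmin index never drops below the scanned range
theorem pvMM_ge (s : List Char) :
    ∀ k (b : Int), 0 ≤ b → b ≤ (s.length : Int) - 1 → ((s.length : Int) - 1 - b).toNat ≤ k →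
      b ≤ (pvMM s b).2 := by
  intro k
  induction k with
  | zero =>
    intro b hb0 hb1 hk
    have hbe : b = (s.length : Int) - 1 := by omega
    have : PySem.List.pyRange ((s.length : Int) - 2) (b - 1) (-1) = [] := by
      apply PySem.List.pyRange_neg_one_eq_nil; omega
    rw [hbe] at this ⊢
    simp [pvMM, this]
  | succ k ih =>
    intro b hb0 hb1 hk
    by_cases hbe : b = (s.length : Int) - 1
    · have : PySem.List.pyRange ((s.length : Int) - 2) (b - 1) (-1) = [] := by
        apply PySem.List.pyRange_neg_one_eq_nil; omega
      rw [hbe] at this ⊢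
      simp [pvMM, this]
    · have hlt : b - 1 < (s.length : Int) - 2 := by omega
      have hsnoc := pvRange_neg_one_snoc ((s.length : Int) - 2) (b - 1) hlt
      have : pvMM s b = pvStepM s (pvMM s (b + 1)) b := by
        simp only [pvMM]
        rw [show b - 1 + 1 = b by ring] at hsnoc
        rw [hsnoc, List.foldl_append]
        simp [show b + 1 - 1 = b by ring]
      rw [this]
      have hih := ih (b + 1) (by omega) (by omega) (by omega)
      unfold pvStepM
      split <;> omega

-- LINK: A's whole scan at level b is decided by B's suffix minimum (pvMM) at b+1
theorem pvLink (s : List Char) :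
    ∀ k (b : Int) (m0 : Char), 0 ≤ b → b ≤ (s.length : Int) - 2 →
      ((s.length : Int) - 2 - b).toNat ≤ k →
      (PySem.List.pyRange ((s.length : Int) - 1) b (-1)).foldl (pvStepA s) (-1, m0)
        = (if (pvMM s (b + 1)).1 < m0 then ((pvMM s (b + 1)).2, (pvMM s (b + 1)).1) else (-1, m0)) := by
  intro k
  induction k with
  | zero =>
    intro b m0 hb0 hb2 hk
    have hbe : b = (s.length : Int) - 2 := by omega
    have h1 : PySem.List.pyRange ((s.length : Int) - 1) b (-1)
        = [(s.length : Int) - 1] := by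
      rw [PySem.List.pyRange_neg_one_cons (by omega)]
      rw [PySem.List.pyRange_neg_one_eq_nil (by omega)]
    have h2 : PySem.List.pyRange ((s.length : Int) - 2) b (-1) = [] := by
      apply PySem.List.pyRange_neg_one_eq_nil; omega
    simp [h1, pvMM, h2, pvStepA]
  | succ k ih =>
    intro b m0 hb0 hb2 hk
    by_cases hbe : b = (s.length : Int) - 2
    · -- same as the base case
      have h1 : PySem.List.pyRange ((s.length : Int) - 1) b (-1)
          = [(s.length : Int) - 1] := by
        rw [PySem.List.pyRange_neg_one_cons (by omega)]
        rw [PySem.List.pyRange_neg_one_eq_nil (by omega)]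
      have h2 : PySem.List.pyRange ((s.length : Int) - 2) b (-1) = [] := by
        apply PySem.List.pyRange_neg_one_eq_nil; omega
      simp [h1, pvMM, h2, pvStepA]
    · have hAsnoc := pvRange_neg_one_snoc ((s.length : Int) - 1) b (by omega)
      have hMsnoc := pvRange_neg_one_snoc ((s.length : Int) - 2) b (by omega)
      have hMM : pvMM s (b + 1) = pvStepM s (pvMM s (b + 2)) (b + 1) := by
        simp only [pvMM]
        rw [show b + 1 - 1 = b by ring, hMsnoc, List.foldl_append]
        simp [show b + 2 - 1 = b + 1 by ring]
      rw [hAsnoc, List.foldl_append, ih (b + 1) m0 (by omega) (by omega) (by omega), hMM]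
      simp only [show b + 1 + 1 = b + 2 from by ring]
      by_cases hmm : (pvMM s (b + 2)).1 < m0
      · rw [if_pos hmm]
        by_cases hcm : PySem.List.pyGetD s (b + 1) ' ' < (pvMM s (b + 2)).1
        · have hc0 : PySem.List.pyGetD s (b + 1) ' ' < m0 := lt_trans hcm hmm
          simp [pvStepA, pvStepM, hcm, hmm, hc0]
        · simp [pvStepA, pvStepM, hcm, hmm]
      · rw [if_neg hmm]
        by_cases hcm : PySem.List.pyGetD s (b + 1) ' ' < (pvMM s (b + 2)).1
        · simp [pvStepA, pvStepM, hcm]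
        · have hc0 : ¬ PySem.List.pyGetD s (b + 1) ' ' < m0 := fun h =>
            hmm (lt_of_le_of_lt (not_lt.mp hcm) h)
          simp [pvStepA, pvStepM, hcm, hmm, hc0]

-- '0' ∈ a[1:]  ↔  some scanned position j of A's idx = 0 loop holds '0'
theorem pvContains_iff (s : List Char) :
    ((PySem.List.slice s (some 1) none).contains '0' = true)
      ↔ ∃ j ∈ PySem.List.pyRange ((s.length : Int) - 1) 0 (-1), PySem.List.pyGetD s j ' ' = '0' := by
  rw [PySem.List.slice_from_one, ← List.drop_one]
  constructor
  · intro h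
    have h' : '0' ∈ s.drop 1 := by simpa using h
    rw [List.mem_iff_getElem] at h'
    obtain ⟨m, hm, hget⟩ := h'
    rw [List.length_drop] at hm
    refine ⟨((m + 1 : Nat) : Int), ?_, ?_⟩
    · rw [PySem.List.mem_pyRange_neg_one]
      constructor <;> [push_cast; push_cast] <;> omega
    · rw [PySem.List.pyGetD_natCast]
      rw [List.getElem_drop] at hget
      rw [List.getD_eq_getElem?_getD, List.getElem?_eq_getElem (by omega)]
      simpa [Nat.add_comm] using hget
  · rintro ⟨j, hj, hget⟩
    rw [PySem.List.mem_pyRange_neg_one] at hj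
    rw [PySem.List.pyGetD_eq_getElem s ' ' (by omega) (by omega)] at hget
    have hmem : '0' ∈ s.drop 1 := by
      rw [List.mem_iff_getElem]
      refine ⟨j.toNat - 1, by rw [List.length_drop]; omega, ?_⟩
      rw [List.getElem_drop]
      convert hget using 2
      omega
    simpa using hmem

-- B's backward fold run with start position p, as a named proof-side value
def pvFB (s : List Char) (p : Int) : Int × Int × Char × Int :=
  (PySem.List.pyRange ((s.length : Int) - 2) (p - 1) (-1)).foldl (pvStepB s)
    (-1, -1, PySem.List.pyGetD s ((s.length : Int) - 1) ' ', (s.length : Int) - 1)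

theorem pvFB_nil (s : List Char) (p : Int) (hp : (s.length : Int) - 1 ≤ p) :
    pvFB s p = (-1, -1, PySem.List.pyGetD s ((s.length : Int) - 1) ' ', (s.length : Int) - 1) := by
  unfold pvFB
  rw [PySem.List.pyRange_neg_one_eq_nil (by omega)]
  rfl

theorem pvFB_step (s : List Char) (p : Int) (hp : p ≤ (s.length : Int) - 2) :
    pvFB s p = pvStepB s (pvFB s (p + 1)) p := by
  unfold pvFB
  rw [pvRange_neg_one_snoc ((s.length : Int) - 2) (p - 1) (by omega), List.foldl_append]
  simp [show p - 1 + 1 = p from by ring, show p + 1 - 1 = p from by ring]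

theorem pvFB_proj (s : List Char) (p : Int) : (pvFB s p).2.2 = pvMM s p := by
  unfold pvFB pvMM
  rw [pvFoldB_proj]

-- pvAltList, unfolded, when the start-adjustment does not fire
theorem pvAlt_eq (s : List Char) (idx : Int) (hlt : idx < (s.length : Int) - 1)
    (hs : (idx == 0 && (PySem.List.slice s (some 1) none).contains '0') = false) :
    pvAltList s idx =
      (if (pvFB s idx).1 == -1 then s
       else PySem.List.pySetD
         (PySem.List.pySetD s (pvFB s idx).1 (PySem.List.pyGetD s (pvFB s idx).2.1 ' '))
         (pvFB s idx).2.1 (PySem.List.pyGetD s (pvFB s idx).1 ' ')) := by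
  simp only [pvAltList, pvFB, hs, Bool.false_eq_true, if_false, if_neg (not_le.mpr hlt)]

-- pvAltList, unfolded, at idx = 0 when a[1:] contains '0' (start becomes 1)
theorem pvAlt_zero (s : List Char) (hlt : (0 : Int) < (s.length : Int) - 1)
    (hc : (PySem.List.slice s (some 1) none).contains '0' = true) :
    pvAltList s 0 =
      (if (pvFB s 1).1 == -1 then s
       else PySem.List.pySetD
         (PySem.List.pySetD s (pvFB s 1).1 (PySem.List.pyGetD s (pvFB s 1).2.1 ' '))
         (pvFB s 1).2.1 (PySem.List.pyGetD s (pvFB s 1).1 ' ')) := by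
  simp only [pvAltList, pvFB, hc, BEq.rfl, Bool.and_self, if_true, if_neg (not_le.mpr hlt)]

theorem pvAlt_big (s : List Char) (idx : Int) (h : (s.length : Int) - 1 ≤ idx) :
    pvAltList s idx = s := by
  simp only [pvAltList, ge_iff_le, if_pos h]

-- skipping position 0 (the '0' rule) does not change B's answer
theorem pvAlt_zero_skip (s : List Char) (hlt : (0 : Int) < (s.length : Int) - 1)
    (hc : (PySem.List.slice s (some 1) none).contains '0' = true) :
    pvAltList s 0 = pvAltList s 1 := by
  by_cases h2 : (s.length : Int) - 1 ≤ 1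
  · rw [pvAlt_zero s hlt hc, pvAlt_big s 1 h2, pvFB_nil s 1 (by omega)]
    rfl
  · rw [pvAlt_zero s hlt hc, pvAlt_eq s 1 (by omega) (by rfl)]

-- main induction: A's recursion from idx computes B's single backward pass started at idx
theorem pvMain (s : List Char) :
    ∀ k (idx : Int), 0 ≤ idx → ((s.length : Int) - idx).toNat ≤ k →
      pvSwapToMinA s idx = pvAltList s idx := by
  intro k
  induction k with
  | zero =>
    intro idx h0 hk
    have hbig : (s.length : Int) - 1 ≤ idx := by omega
    rw [pvSwapToMinA, if_pos (by omega), pvAlt_big s idx hbig]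
  | succ k ih =>
    intro idx h0 hk
    by_cases hbig : (s.length : Int) - 1 ≤ idx
    · rw [pvSwapToMinA, if_pos (by omega), pvAlt_big s idx hbig]
    · have hlt : idx < (s.length : Int) - 1 := by omega
      rw [pvSwapToMinA, if_neg (by omega)]
      by_cases hz : idx = 0 ∧ (PySem.List.slice s (some 1) none).contains '0' = true
      · -- the '0' rule: A recurses straight to idx = 1, B starts its pass at 1
        obtain ⟨hi0, hc⟩ := hz
        subst hi0
        rw [pvScanA_zero s _ (pvContains_iff s |>.mp hc)]
        show pvSwapToMinA s (0 + 1) = pvAltList s 0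
        rw [show (0 : Int) + 1 = 1 from rfl, ih 1 (by omega) (by omega)]
        exact (pvAlt_zero_skip s hlt hc).symm
      · -- normal scan at idx
        have hs : (idx == 0 && (PySem.List.slice s (some 1) none).contains '0') = false := by
          by_cases hi0 : idx = 0
          · subst hi0
            cases hcc : (PySem.List.slice s (some 1) none).contains '0'
            · simp
            · exact absurd ⟨rfl, hcc⟩ hz
          · simp [hi0]
        have hnone : ∀ j ∈ PySem.List.pyRange ((s.length : Int) - 1) idx (-1),
            (PySem.List.pyGetD s j ' ' == '0' && idx == 0) = false := by
          intro jj hjj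
          by_cases hi0 : idx = 0
          · subst hi0
            cases hcc : (PySem.List.slice s (some 1) none).contains '0'
            · have hne : ¬ PySem.List.pyGetD s jj ' ' = '0' := by
                intro h
                have := (pvContains_iff s).mpr ⟨jj, hjj, h⟩
                rw [hcc] at this
                exact absurd this (by simp)
              simp [hne]
            · exact absurd ⟨rfl, hcc⟩ hz
          · simp [hi0]
        rw [pvScanA_eq_fold s idx _ hnone]
        rw [pvLink s ((s.length : Int) - 2 - idx).toNat idx (PySem.List.pyGetD s idx ' ')
          h0 (by omega) le_rfl]
        have hstep : pvFB s idx = pvStepB s (pvFB s (idx + 1)) idx :=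
          pvFB_step s idx (by omega)
        have hproj : (pvFB s (idx + 1)).2.2 = pvMM s (idx + 1) := pvFB_proj s (idx + 1)
        by_cases hPm : (pvMM s (idx + 1)).1 < PySem.List.pyGetD s idx ' '
        · -- a beneficial swap exists at idx: both sides swap idx with the rightmost suffix argmin
          have hge : idx + 1 ≤ (pvMM s (idx + 1)).2 :=
            pvMM_ge s ((s.length : Int) - 1 - (idx + 1)).toNat (idx + 1) (by omega) (by omega) le_rfl
          have hr1 : (pvFB s idx).1 = idx := by
            rw [hstep]; simp [pvStepB, hproj, hPm]
          have hr2 : (pvFB s idx).2.1 = (pvMM s (idx + 1)).2 := by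
            rw [hstep]; simp [pvStepB, hproj, hPm]
          rw [if_pos hPm]
          simp only [ne_eq]
          rw [if_pos (by omega : ¬ (pvMM s (idx + 1)).2 = -1)]
          rw [pvAlt_eq s idx hlt hs, hr1, hr2, if_neg (by simpa using by omega : ¬ (idx == -1) = true)]
        · -- no beneficial swap at idx: A recurses, B's last iteration leaves (best, tgt) unchanged
          have hr1 : (pvFB s idx).1 = (pvFB s (idx + 1)).1 := by
            rw [hstep]; simp [pvStepB, hproj, hPm]
          have hr2 : (pvFB s idx).2.1 = (pvFB s (idx + 1)).2.1 := by
            rw [hstep]; simp [pvStepB, hproj, hPm]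
          rw [if_neg hPm]
          simp only [ne_eq, not_true_eq_false, if_false]
          rw [ih (idx + 1) (by omega) (by omega)]
          rw [pvAlt_eq s idx hlt hs, hr1, hr2]
          by_cases hend : (s.length : Int) - 1 ≤ idx + 1
          · rw [pvAlt_big s (idx + 1) hend, pvFB_nil s (idx + 1) hend]
            rfl
          · rw [pvAlt_eq s (idx + 1) (by omega) (by simp [show idx + 1 ≠ 0 from by omega])]

-- ===== VERDICT (by name: the statement is the Claim_ definition above) =====
theorem swap_to_min_spec : Claim_equal_swap_to_min := by
  intro a idx _hdom hpre
  unfold Spec_swap_to_min swap_to_min swap_to_min_alt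
  exact congrArg String.ofList
    (pvMain a.toList ((a.toList.length : Int) - idx).toNat idx hpre le_rfl)
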